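-- pv_equiv track=rewrite | github.com/odissei-data/dataverse-mapper | src/utils.py | clean_path
-- ===== SOURCE A (Python) =====
-- def clean_path(path):
--     """
--     Escape special characters for jmespath by placing them between double
--     quotes.
--
--     :param path: string
--     :return: string
--     """
--     new_path = ''
--
--     split_path = path.split(".")
--     for step in split_path:
--         index = step.find('[')
--         if index == -1:
--             new_step = f'."{step}"'
--         else:
--             key = step[:index]
--             slice_index = step[index:]
--             new_step = f'."{key}"{slice_index}'
--
--         new_path += new_step
--
--     return new_path[1:]
-- ===== SOURCE B (Python) =====
-- def clean_path(path):
--     """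
--     Escape special characters for jmespath by placing them between double
--     quotes.
--
--     :param path: string
--     :return: string
--     """
--     out = ['"']
--     quoting = True
--     for c in path:
--         if c == '.':
--             if quoting:
--                 out.append('"')
--             out.append('."')
--             quoting = True
--         elif c == '[' and quoting:
--             out.append('"[')
--             quoting = False
--         else:
--             out.append(c)
--     if quoting:
--         out.append('"')
--     return ''.join(out)
-- ===== Notes on version B (the rewrite author's own statement) =====
-- stated objective: alternative
-- what changed: B replaces A's split-on-dot + per-segment bracket-find/slicing loop with a single left-to-right character scan (a two-state machine: inside/after the quoted name) that emits quotes in place.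
import Mathlib
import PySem

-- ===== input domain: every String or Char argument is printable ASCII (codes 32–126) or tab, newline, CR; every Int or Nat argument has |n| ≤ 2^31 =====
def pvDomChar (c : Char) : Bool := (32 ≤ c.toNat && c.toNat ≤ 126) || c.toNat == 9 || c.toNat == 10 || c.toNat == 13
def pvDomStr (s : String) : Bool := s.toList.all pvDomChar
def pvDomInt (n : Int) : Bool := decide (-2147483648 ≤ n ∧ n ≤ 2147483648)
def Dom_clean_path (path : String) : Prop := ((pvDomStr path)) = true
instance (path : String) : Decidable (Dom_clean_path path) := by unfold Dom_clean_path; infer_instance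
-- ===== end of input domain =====

-- B replaces A's split/find/slice loop with a single character scan; same cost, different algorithm.

-- ===== PORT A =====
-- A's loop body: quote the part of the step before its first opening bracket (the whole step if none).
def encSeg (step : List Char) : List Char :=
  let index := PySem.Chars.find step ['[']
  if index = -1 then
    ['.', '"'] ++ step ++ ['"']
  else
    let key := PySem.List.slice step none (some index)
    let slice_index := PySem.List.slice step (some index) none
    ['.', '"'] ++ key ++ ['"'] ++ slice_index

def clean_path (path : String) : String :=
  let split_path := PySem.Chars.splitOn path.toList ['.']
  let new_path := split_path.foldl (fun new_path step => new_path ++ encSeg step) []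
  String.ofList (PySem.List.slice new_path (some 1) none)

-- ===== PORT B =====
-- B's loop body: the two-state machine step (output so far, currently inside the quoted name).
def bStep (acc : List Char × Bool) (c : Char) : List Char × Bool :=
  if c = '.' then
    ((if acc.2 then acc.1 ++ ['"'] else acc.1) ++ ['.', '"'], true)
  else if c = '[' ∧ acc.2 = true then
    (acc.1 ++ ['"', '['], false)
  else
    (acc.1 ++ [c], acc.2)

def clean_path_alt (path : String) : String :=
  let res := path.toList.foldl bStep (['"'], true)
  String.ofList (if res.2 then res.1 ++ ['"'] else res.1)

-- ===== PRECONDITION & SPEC =====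
def Spec_clean_path (path : String) (out : String) : Prop := out = clean_path_alt path
instance (path : String) (out : String) : Decidable (Spec_clean_path path out) := by unfold Spec_clean_path; infer_instance

-- ===== CLAIM (what is proved, stated in full; the proofs are below) =====
def Claim_equal_clean_path : Prop := ∀ (path : String), Dom_clean_path path → Spec_clean_path path (clean_path path)

-- ===== LEMMAS AND PROOFS =====

-- the machine's output after the initial '"', with the closing '"' folded in
def Fm : Bool → List Char → List Char
  | q, [] => if q then ['"'] else []
  | q, c :: cs =>
    if c = '.' then (if q then ['"'] else []) ++ '.' :: '"' :: Fm true cs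
    else if c = '[' ∧ q = true then '"' :: '[' :: Fm false cs
    else c :: Fm q cs

-- a simple structural splitter on '.' (proved equal to PySem.Chars.splitOn · ['.'])
def D : List Char → List (List Char)
  | [] => [[]]
  | c :: cs =>
    if c = '.' then [] :: D cs
    else
      match D cs with
      | [] => [[c]]
      | s :: ss => (c :: s) :: ss

lemma D_ne_nil (l : List Char) : D l ≠ [] := by
  cases l with
  | nil => simp [D]
  | cons c cs =>
    simp only [D]
    split
    · simp
    · split <;> simp

lemma first_occ (a : Char) (cs : List Char) (h : a ∈ cs) :
    ∃ u v, cs = u ++ a :: v ∧ a ∉ u := by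
  induction cs with
  | nil => simp at h
  | cons c cs ih =>
    by_cases hc : c = a
    · exact ⟨[], cs, by simp [hc], by simp⟩
    · have h' : a ∈ cs := by
        rcases List.mem_cons.mp h with h1 | h1
        · exact absurd h1.symm hc
        · exact h1
      obtain ⟨u, v, rfl, hu⟩ := ih h' 
      exact ⟨c :: u, v, rfl, by simp [hu, Ne.symm hc]⟩

lemma go_spec : ∀ (fuel : Nat) (l cur : List Char) (acc : List (List Char)), l.length < fuel →
    PySem.Chars.splitOn.go ['.'] fuel l cur acc =
      acc.reverse ++ (match D l with
        | [] => [cur.reverse]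
        | s :: ss => (cur.reverse ++ s) :: ss) := by
  
  intro fuel
  induction fuel with
  | zero => intro l cur acc h; omega
  | succ n ih =>
    intro l cur acc h
    cases l with
    | nil =>
      obtain ⟨s, ss, hD⟩ : ∃ s ss, D ([] : List Char) = s :: ss := ⟨[], [], rfl⟩
      simp [PySem.Chars.splitOn.go, D]
    | cons c rest =>
      by_cases hc : c = '.'
      · subst hc
        obtain ⟨s, ss, hD⟩ := List.exists_cons_of_ne_nil (D_ne_nil rest)
        rw [PySem.Chars.splitOn.go]
        simp only [List.isPrefixOf, beq_self_eq_true, Bool.true_and]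
        rw [show List.drop ['.'].length ('.' :: rest) = rest from rfl]
        rw [ih rest [] (cur.reverse :: acc) (by simp at h ⊢; omega)]
        simp [D, hD]
      · obtain ⟨s, ss, hD⟩ := List.exists_cons_of_ne_nil (D_ne_nil rest)
        rw [PySem.Chars.splitOn.go]
        have hpre : List.isPrefixOf ['.'] (c :: rest) = false := by
          simp [List.isPrefixOf, Ne.symm hc]
        rw [hpre]
        simp only [Bool.false_eq_true, if_false]
        rw [ih rest (c :: cur) acc (by simp at h ⊢; omega)]
        simp [D, hc, hD]

lemma splitOn_eq_D (cs : List Char) : PySem.Chars.splitOn cs ['.'] = D cs := by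
  
  obtain ⟨s, ss, hD⟩ := List.exists_cons_of_ne_nil (D_ne_nil cs)
  unfold PySem.Chars.splitOn
  rw [go_spec (cs.length + 1) cs [] [] (by omega)]
  simp [hD]

lemma D_no_dot (u : List Char) (h : '.' ∉ u) : D u = [u] := by
  
  induction u with
  | nil => simp [D]
  | cons c u ih =>
    simp only [List.mem_cons, not_or] at h
    simp [D, Ne.symm h.1, ih h.2]

lemma D_append_dot (u rest : List Char) (h : '.' ∉ u) :
    D (u ++ '.' :: rest) = u :: D rest := by
  
  induction u with
  | nil => simp [D]
  | cons c u ih =>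
    simp only [List.mem_cons, not_or] at h
    simp [D, Ne.symm h.1, ih h.2]

lemma Fm_false_no_dot (v : List Char) (h : '.' ∉ v) : Fm false v = v := by
  
  induction v with
  | nil => simp [Fm]
  | cons c v ih =>
    simp only [List.mem_cons, not_or] at h
    simp [Fm, Ne.symm h.1, ih h.2]

lemma Fm_true_plain (s : List Char) (hd : '.' ∉ s) (hb : '[' ∉ s) :
    Fm true s = s ++ ['"'] := by
  
  induction s with
  | nil => simp [Fm]
  | cons c s ih =>
    simp only [List.mem_cons, not_or] at hd hb
    simp [Fm, Ne.symm hd.1, Ne.symm hb.1, ih hd.2 hb.2]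

lemma Fm_true_bracket (u v : List Char) (hd : '.' ∉ u) (hv : '.' ∉ v) (hb : '[' ∉ u) :
    Fm true (u ++ '[' :: v) = u ++ '"' :: '[' :: v := by
  
  induction u with
  | nil => simp [Fm, Fm_false_no_dot v hv]
  | cons c u ih =>
    simp only [List.mem_cons, not_or] at hd hb
    simp [Fm, Ne.symm hd.1, Ne.symm hb.1, ih hd.2 hb.2]

lemma Fm_false_dot (b rest : List Char) (h : '.' ∉ b) :
    Fm false (b ++ '.' :: rest) = b ++ '.' :: '"' :: Fm true rest := by
  
  induction b with
  | nil => simp [Fm]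
  | cons c b ih =>
    simp only [List.mem_cons, not_or] at h
    simp [Fm, Ne.symm h.1, ih h.2]

lemma Fm_true_dot (u rest : List Char) (h : '.' ∉ u) :
    Fm true (u ++ '.' :: rest) = Fm true u ++ '.' :: '"' :: Fm true rest := by
  
  induction u with
  | nil => simp [Fm]
  | cons c u ih =>
    simp only [List.mem_cons, not_or] at h
    by_cases hb : c = '['
    · subst hb
      simp [Fm, Fm_false_dot u rest h.2, Fm_false_no_dot u h.2]
    · simp [Fm, Ne.symm h.1, hb, ih h.2]

lemma find_no_bracket (s : List Char) (h : '[' ∉ s) : PySem.Chars.find s ['['] = -1 := by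
  
  rw [PySem.Chars.find_eq_neg_one_iff]
  intro hin
  exact h (hin.subset (by simp))

lemma find_bracket (u v : List Char) (hb : '[' ∉ u) :
    PySem.Chars.find (u ++ '[' :: v) ['['] = u.length := by
  
  have hin : ['['] <:+: (u ++ '[' :: v) := ⟨u, v, by simp⟩
  have h0 : 0 ≤ PySem.Chars.find (u ++ '[' :: v) ['['] :=
    (PySem.Chars.find_nonneg_iff _ _).mpr hin
  obtain ⟨hpre, hmin⟩ := PySem.Chars.find_spec h0
  set i := (PySem.Chars.find (u ++ '[' :: v) ['[']).toNat with hi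
  have hieq : i = u.length := by
    rcases Nat.lt_trichotomy i u.length with hlt | heq | hgt
    · exfalso
      obtain ⟨t, ht⟩ := hpre
      rw [List.drop_append_of_le_length (by omega)] at ht
      rw [List.drop_eq_getElem_cons hlt] at ht
      simp only [List.singleton_append] at ht
      injection ht with h1 _
      exact hb (h1.symm ▸ List.getElem_mem hlt)
    · exact heq
    · exfalso
      apply hmin u.length hgt
      refine ⟨v, ?_⟩
      rw [show (u ++ '[' :: v).drop u.length = '[' :: v from by simp]
      simp
  have := Int.toNat_of_nonneg h0
  omega

lemma encSeg_eq (s : List Char) (hd : '.' ∉ s) : encSeg s = '.' :: '"' :: Fm true s := by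
  
  by_cases hb : '[' ∈ s
  · obtain ⟨u, v, rfl, hu⟩ := first_occ '[' s hb
    have hdu : '.' ∉ u := fun h => hd (by simp [h])
    have hdv : '.' ∉ v := fun h => hd (by simp [h])
    unfold encSeg
    rw [find_bracket u v hu]
    have hne : (u.length : Int) ≠ -1 := by omega
    rw [if_neg hne]
    rw [PySem.List.slice_to]
    rw [PySem.List.slice_from]
    simp only [Int.toNat_natCast, List.take_left, List.drop_left]
    rw [Fm_true_bracket u v hdu hdv hu]
    simp
    all_goals exact Int.natCast_nonneg _
  · unfold encSeg
    rw [find_no_bracket s hb, if_pos rfl, Fm_true_plain s hd hb]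
    simp

lemma main_lemma : ∀ (n : Nat) (cs : List Char), cs.length ≤ n →
    (D cs).flatMap encSeg = '.' :: '"' :: Fm true cs := by
  
  intro n
  induction n with
  | zero =>
    intro cs hl
    have : cs = [] := List.eq_nil_of_length_eq_zero (by omega)
    subst this
    rw [D_no_dot [] (by simp)]
    simp [encSeg_eq [] (by simp)]
  | succ n ih =>
    intro cs hl
    by_cases hd : '.' ∈ cs
    · obtain ⟨u, rest, rfl, hu⟩ := first_occ '.' cs hd
      rw [D_append_dot u rest hu]
      rw [List.flatMap_cons]
      rw [ih rest (by simp at hl; omega)]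
      rw [encSeg_eq u hu, Fm_true_dot u rest hu]
      simp
    · rw [D_no_dot cs hd]
      simp [encSeg_eq cs hd]

lemma B_run : ∀ (cs : List Char) (out : List Char) (q : Bool),
    (if (cs.foldl bStep (out, q)).2 then (cs.foldl bStep (out, q)).1 ++ ['"']
     else (cs.foldl bStep (out, q)).1) = out ++ Fm q cs := by
  
  intro cs
  induction cs with
  | nil => intro out q; cases q <;> simp [Fm]
  | cons c cs ih =>
    intro out q
    rw [List.foldl_cons]
    by_cases hc : c = '.'
    · subst hc
      rw [show bStep (out, q) '.' = ((if q then out ++ ['"'] else out) ++ ['.', '"'], true) from by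
        simp [bStep]]
      rw [ih]
      cases q <;> simp [Fm]
    · by_cases h2 : c = '[' ∧ q = true
      · obtain ⟨hc2, hq⟩ := h2
        subst hc2; subst hq
        rw [show bStep (out, true) '[' = (out ++ ['"', '['], false) from by simp [bStep]]
        rw [ih]
        simp [Fm]
      · rw [show bStep (out, q) c = (out ++ [c], q) from by
          simp only [bStep]
          rw [if_neg hc, if_neg (by simpa using h2)]]
        rw [ih]
        have hb : ¬(c = '[' ∧ q = true) := h2
        cases q <;> simp_all [Fm]

-- ===== VERDICT (by name: the statement is the Claim_ definition above) =====
theorem clean_path_spec : Claim_equal_clean_path := by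
  intro path _
  unfold Spec_clean_path clean_path clean_path_alt
  have hA : (PySem.Chars.splitOn path.toList ['.']).foldl
      (fun new_path step => new_path ++ encSeg step) [] = '.' :: '"' :: Fm true path.toList := by
    rw [splitOn_eq_D]
    rw [PySem.List.foldl_append_eq_flatMap]
    simpa using main_lemma path.toList.length path.toList le_rfl
  have hB := B_run path.toList ['"'] true
  simp only [hA, hB]
  rw [PySem.List.slice_from_one]
  simp
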